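-- pv_equiv track=rewrite | github.com/bjrnwnklr/AoC2020 | 14/aoc2020_14_2.py | generate_bitmask
-- ===== SOURCE A (Python) =====
-- def generate_bitmask(mask):
--     set_1 = 0b0
--     set_0 = 0b0
--     floating = []
--
--     for i, c in enumerate(mask[::-1]):
--         if c == '1':
--             # for part 2, we don't do anything if a 0 is found
--             # set the ith bit to 1 in the set_1 mask
--             set_1 |= 1 << i
--         elif c == 'X':
--             # found a floating bit, record its index
--             floating.append(i)
--
--     return set_0, set_1, floating
-- ===== SOURCE B (Python) =====
-- def generate_bitmask(mask):
--     # set_1 by Horner evaluation over the mask read left to right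
--     set_1 = 0
--     for c in mask:
--         set_1 = 2 * set_1 + (1 if c == '1' else 0)
--     # floating bit indices (ascending) by a comprehension over the reversed mask
--     floating = [i for i, c in enumerate(reversed(mask)) if c == 'X']
--     return 0, set_1, floating
-- ===== Notes on version B (the rewrite author's own statement) =====
-- stated objective: alternative
-- what changed: Replaces A's single reverse-enumerate loop that builds set_1 by bit-shift/OR and appends floating indices with a forward Horner arithmetic pass for set_1 plus a separate comprehension over the reversed mask for the floating indices.
import Mathlib
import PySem

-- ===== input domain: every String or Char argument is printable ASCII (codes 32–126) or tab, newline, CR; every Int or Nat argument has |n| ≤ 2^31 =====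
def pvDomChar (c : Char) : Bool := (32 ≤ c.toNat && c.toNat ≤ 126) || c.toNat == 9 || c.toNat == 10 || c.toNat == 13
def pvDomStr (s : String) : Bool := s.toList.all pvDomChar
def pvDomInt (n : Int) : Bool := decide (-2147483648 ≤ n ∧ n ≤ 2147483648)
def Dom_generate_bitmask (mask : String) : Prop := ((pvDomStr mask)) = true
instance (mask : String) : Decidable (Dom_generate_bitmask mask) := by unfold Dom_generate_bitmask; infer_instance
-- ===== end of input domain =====

-- B replaces A's single reverse-enumerate shift/OR-and-append loop by a forward Horner
-- pass for set_1 plus a separate comprehension for the floating indices (objective: alternative).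

-- ===== PORT A =====
-- the body of A's for-loop over enumerate(mask[::-1])
def pvAStep (st : Int × List Int) (ic : Int × Char) : Int × List Int :=
  if ic.2 = '1' then (PySem.Int.bor st.1 ((1 : Int) <<< ic.1.toNat), st.2)
  else if ic.2 = 'X' then (st.1, st.2 ++ [ic.1])
  else st

def generate_bitmask (mask : String) : Int × Int × List Int :=
  let set_0 : Int := 0
  -- mask[::-1]
  let rev := ((PySem.Str.slice? mask none none (-1)).getD "").toList
  let st := (PySem.List.enumerate rev 0).foldl pvAStep ((0 : Int), ([] : List Int))
  (set_0, st.1, st.2)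

-- ===== PORT B =====
def generate_bitmask_alt (mask : String) : Int × Int × List Int :=
  let set_1 := mask.toList.foldl (fun a c => 2 * a + (if c = '1' then 1 else 0)) (0 : Int)
  let floating :=
    ((PySem.List.enumerate mask.toList.reverse 0).filter (fun p => p.2 = 'X')).map (·.1)
  (0, set_1, floating)

-- ===== PRECONDITION & SPEC =====
def Spec_generate_bitmask (mask : String) (out : Int × Int × List Int) : Prop := out = generate_bitmask_alt mask
instance (mask : String) (out : Int × Int × List Int) : Decidable (Spec_generate_bitmask mask out) := by unfold Spec_generate_bitmask; infer_instance

-- ===== CLAIM (what is proved, stated in full; the proofs are below) =====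
def Claim_equal_generate_bitmask : Prop := ∀ (mask : String), Dom_generate_bitmask mask → Spec_generate_bitmask mask (generate_bitmask mask)

-- ===== LEMMAS AND PROOFS =====

-- value contributed by the chars of l at bit positions s, s+1, …
def pvVal : List Char → Nat → Int
  | [], _ => 0
  | c :: t, s => (if c = '1' then 2 ^ s else 0) + pvVal t (s + 1)

-- floating indices contributed by the chars of l at positions s, s+1, …
def pvFl : List Char → Nat → List Int
  | [], _ => []
  | c :: t, s => (if c = 'X' then [(s : Int)] else []) ++ pvFl t (s + 1)

lemma pv_bor_pow (a : Int) (s : Nat) (h0 : 0 ≤ a) (h1 : a < 2 ^ s) :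
    PySem.Int.bor a ((1 : Int) <<< s) = a + 2 ^ s := by
  have hsh : (1 : Int) <<< s = ((2 ^ s : Nat) : Int) := by
    simp [Int.shiftLeft_eq]
  rw [hsh, PySem.Int.bor_of_nonneg h0 (by positivity)]
  have ha : a.toNat < 2 ^ s := by
    have h2 : ((2 ^ s : Nat) : Int) = 2 ^ s := by push_cast; ring
    omega
  have := Nat.two_pow_add_eq_or_of_lt ha 1
  simp only [Nat.mul_one] at this
  rw [Int.toNat_natCast, Nat.lor_comm, ← this]
  push_cast [Int.toNat_of_nonneg h0]
  ring

-- A's loop over enumerate l ↑s, started at (a, fl) with 0 ≤ a < 2^s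
lemma pv_loopA (l : List Char) (s : Nat) (a : Int) (fl : List Int)
    (h0 : 0 ≤ a) (h1 : a < 2 ^ s) :
    (PySem.List.enumerate l (s : Int)).foldl pvAStep (a, fl)
      = (a + pvVal l s, fl ++ pvFl l s) := by
  induction l generalizing s a fl with
  | nil => simp [PySem.List.enumerate_nil, pvVal, pvFl]
  | cons c t ih =>
    have hc : ((s : Int) + 1) = ((s + 1 : Nat) : Int) := by push_cast; ring
    rw [PySem.List.enumerate_cons, List.foldl_cons, hc]
    by_cases h1c : c = '1'
    · have hstep : pvAStep (a, fl) ((s : Int), c)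
          = (a + 2 ^ s, fl) := by
        simp [pvAStep, h1c, pv_bor_pow a s h0 h1]
      have hpos : (0 : Int) < 2 ^ s := by positivity
      have h2 : (2 : Int) ^ (s + 1) = 2 * 2 ^ s := by ring
      rw [hstep, ih (s + 1) (a + 2 ^ s) fl (by omega) (by omega)]
      simp [pvVal, pvFl, h1c, add_assoc]
    · by_cases hX : c = 'X'
      · have hstep : pvAStep (a, fl) ((s : Int), c) = (a, fl ++ [(s : Int)]) := by
          simp [pvAStep, hX]
        rw [hstep, ih (s + 1) a (fl ++ [(s : Int)]) h0 (by
          have h2 : (2 : Int) ^ (s + 1) = 2 * 2 ^ s := by ring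
          have hpos : (0 : Int) < 2 ^ s := by positivity
          omega)]
        simp [pvVal, pvFl, hX]
      · have hstep : pvAStep (a, fl) ((s : Int), c) = (a, fl) := by
          simp [pvAStep, hX, h1c]
        rw [hstep, ih (s + 1) a fl h0 (by
          have h2 : (2 : Int) ^ (s + 1) = 2 * 2 ^ s := by ring
          have hpos : (0 : Int) < 2 ^ s := by positivity
          omega)]
        simp [pvVal, pvFl, if_neg h1c, if_neg hX]

lemma pvVal_append (l : List Char) (c : Char) (s : Nat) :
    pvVal (l ++ [c]) s = pvVal l s + (if c = '1' then 2 ^ (s + l.length) else 0) := by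
  induction l generalizing s with
  | nil => simp [pvVal]
  | cons d t ih =>
    simp only [List.cons_append, pvVal, ih (s + 1), List.length_cons]
    have : s + 1 + t.length = s + (t.length + 1) := by omega
    rw [this]
    ring

-- B's Horner fold equals pvVal of the reversed list
lemma pv_horner (cs : List Char) (a : Int) :
    cs.foldl (fun a c => 2 * a + (if c = '1' then 1 else 0)) a
      = a * 2 ^ cs.length + pvVal cs.reverse 0 := by
  induction cs generalizing a with
  | nil => simp [pvVal]
  | cons c t ih =>
    simp only [List.foldl_cons, ih, List.reverse_cons, List.length_cons,
      pvVal_append, List.length_reverse, Nat.zero_add]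
    split_ifs <;> ring

-- B's comprehension equals pvFl
lemma pv_filter_fl (l : List Char) (s : Nat) :
    ((PySem.List.enumerate l (s : Int)).filter (fun p => p.2 = 'X')).map (·.1)
      = pvFl l s := by
  induction l generalizing s with
  | nil => simp [PySem.List.enumerate_nil, pvFl]
  | cons c t ih =>
    have ih' := ih (s + 1)
    rw [Nat.cast_add, Nat.cast_one] at ih'
    rw [PySem.List.enumerate_cons]
    by_cases hX : c = 'X'
    · simp [hX, pvFl, ih']
    · simp [hX, pvFl, ih']

-- ===== VERDICT (by name: the statement is the Claim_ definition above) =====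
theorem generate_bitmask_spec : Claim_equal_generate_bitmask := by
  intro mask _
  unfold Spec_generate_bitmask generate_bitmask generate_bitmask_alt
  rw [PySem.Str.slice?_none_none_neg_one]
  simp only [Option.getD_some, String.toList_ofList]
  have hA := pv_loopA mask.toList.reverse 0 0 [] le_rfl (by norm_num)
  have hF := pv_filter_fl mask.toList.reverse 0
  norm_num at hA hF
  rw [hA, pv_horner mask.toList 0, hF]
  simp
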